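-- pv_equiv track=rewrite | github.com/NotAWiz4rd/agenty-python | rpg_project/game/ui/menu_system.py | create_bordered_text
-- ===== SOURCE A (Python) =====
-- def create_bordered_text(text: str, width: int = 60) -> str:
--     """Create text with a border."""
--     lines = text.split('\n')
--     bordered = []
--
--     # Top border
--     bordered.append("╔" + "═" * (width - 2) + "╗")
--
--     # Content lines
--     for line in lines:
--         if len(line) > width - 4:
--             # Word wrap for long lines
--             words = line.split()
--             current_line = ""
--             for word in words:
--                 if len(current_line + word) <= width - 4:
--                     current_line += word + " "
--                 else:
--                     if current_line:
--                         bordered.append("║ " + current_line.ljust(width - 4) + " ║")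
--                     current_line = word + " "
--             if current_line:
--                 bordered.append("║ " + current_line.ljust(width - 4) + " ║")
--         else:
--             bordered.append("║ " + line.ljust(width - 4) + " ║")
--
--     # Bottom border
--     bordered.append("╚" + "═" * (width - 2) + "╝")
--
--     return '\n'.join(bordered)
-- ===== SOURCE B (Python) =====
-- def create_bordered_text(text: str, width: int = 60) -> str:
--     """Create text with a border (index-based chunking: find each break point from
--     word-length sums, then slice and join, instead of growing a current_line string)."""
--     inner = width - 4
--
--     def wrap(line):
--         if len(line) <= inner:
--             return [line]
--         words = line.split()
--         out, i = [], 0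
--         while i < len(words):
--             j, used = i + 1, len(words[i]) + 1
--             while j < len(words) and used + len(words[j]) <= inner:
--                 used += len(words[j]) + 1
--                 j += 1
--             out.append(" ".join(words[i:j]) + " ")
--             i = j
--         return out
--
--     content = [c for ln in text.split('\n') for c in wrap(ln)]
--     border = "═" * (width - 2)
--     return '\n'.join(["╔" + border + "╗"]
--                      + ["║ " + c.ljust(inner) + " ║" for c in content]
--                      + ["╚" + border + "╝"])
-- ===== Notes on version B (the rewrite author's own statement) =====
-- stated objective: alternative
-- what changed: B replaces A's stateful current_line string accumulator with index-based chunking: for each long line it computes every break index from running word-length sums, slices the word list between breaks and emits each slice joined by single spaces with a trailing space, then frames all content pieces in one uniform pass between the borders.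
import Mathlib
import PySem

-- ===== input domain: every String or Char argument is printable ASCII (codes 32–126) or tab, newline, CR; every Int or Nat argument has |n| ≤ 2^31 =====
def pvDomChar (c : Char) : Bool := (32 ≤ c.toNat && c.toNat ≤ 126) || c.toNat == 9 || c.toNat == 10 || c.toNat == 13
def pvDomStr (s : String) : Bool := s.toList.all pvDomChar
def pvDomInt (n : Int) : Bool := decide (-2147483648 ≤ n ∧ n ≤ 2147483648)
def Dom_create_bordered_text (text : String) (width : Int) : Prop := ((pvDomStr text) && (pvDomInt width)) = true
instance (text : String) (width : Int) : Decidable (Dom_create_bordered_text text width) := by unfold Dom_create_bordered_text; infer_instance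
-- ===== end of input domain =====

-- B wraps long lines by computing each break index from word-length sums, then slicing the word
-- list and joining, instead of A's growing current_line accumulator (objective: alternative).

-- shared primitive: s.ljust(w) = s + ' ' * (w - len(s))  (exact: Python pads with spaces, no-op when w ≤ len(s))
def pvLjust (cs : List Char) (w : Int) : List Char :=
  cs ++ List.replicate (w - (cs.length : Int)).toNat ' '

-- shared primitive: "║ " + s.ljust(width-4) + " ║"  (the framing expression both Pythons write)
def pvFrame (width : Int) (cs : List Char) : List Char :=
  ['║', ' '] ++ pvLjust cs (width - 4) ++ [' ', '║']

-- ===== PORT A =====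
-- the body of A's inner word loop (state p = (bordered, current_line))
def pvStepA (width : Int) (p : List (List Char) × List Char) (word : List Char) :
    List (List Char) × List Char :=
  if ((p.2 ++ word).length : Int) ≤ width - 4 then (p.1, p.2 ++ word ++ [' '])
  else if p.2 ≠ [] then (p.1 ++ [pvFrame width p.2], word ++ [' '])
  else (p.1, word ++ [' '])

-- the body of A's outer line loop
def pvLineStepA (width : Int) (bordered : List (List Char)) (line : List Char) :
    List (List Char) :=
  if (line.length : Int) > width - 4 then
    let st := (PySem.Chars.split₀ line).foldl (pvStepA width) (bordered, ([] : List Char))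
    if st.2 ≠ [] then st.1 ++ [pvFrame width st.2] else st.1
  else bordered ++ [pvFrame width line]

-- literal transliteration of A: one loop over lines appending framed lines to `bordered`
def create_bordered_text (text : String) (width : Int) : String :=
  let lines := PySem.Chars.splitOn text.toList ['\n']
  let bordered : List (List Char) := [['╔'] ++ List.replicate (width - 2).toNat '═' ++ ['╗']]
  let bordered := lines.foldl (pvLineStepA width) bordered
  let bordered := bordered ++ [['╚'] ++ List.replicate (width - 2).toNat '═' ++ ['╝']]
  String.ofList (PySem.Chars.join ['\n'] bordered)

-- ===== PORT B =====
-- inner while loop of Source B's wrap: extend the chunk while `used + len(words[j]) <= inner`,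
-- returning (the words added to the chunk, the remaining words)
def pvTake (inner : Int) (used : Int) : List (List Char) → List (List Char) × List (List Char)
  | [] => ([], [])
  | w :: ws =>
    if used + (w.length : Int) ≤ inner then
      let p := pvTake inner (used + (w.length : Int) + 1) ws
      (w :: p.1, p.2)
    else ([], w :: ws)

-- the remainder is a sub-suffix: justifies pvChunks' recursion
theorem pvTake_len (inner used : Int) (ws : List (List Char)) :
    (pvTake inner used ws).2.length ≤ ws.length := by
  induction ws generalizing used with
  | nil => simp [pvTake]
  | cons w ws ih =>
    simp only [pvTake]
    split
    · exact le_trans (ih _) (Nat.le_succ _)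
    · simp

-- outer while loop of Source B's wrap: cut the word list into chunks at the computed break indices,
-- each chunk emitted as " ".join(chunk) + " "
def pvChunks (inner : Int) : List (List Char) → List (List Char)
  | [] => []
  | w :: ws =>
    let p := pvTake inner ((w.length : Int) + 1) ws
    (PySem.Chars.join [' '] (w :: p.1) ++ [' ']) :: pvChunks inner p.2
  termination_by ws => ws.length
  decreasing_by exact Nat.lt_succ_of_le (pvTake_len _ _ ws)

-- Source B's wrap helper: one input line ↦ its list of content pieces
def pvWrapB (width : Int) (line : List Char) : List (List Char) :=
  if (line.length : Int) ≤ width - 4 then [line]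
  else pvChunks (width - 4) (PySem.Chars.split₀ line)

def create_bordered_text_alt (text : String) (width : Int) : String :=
  let content := (PySem.Chars.splitOn text.toList ['\n']).flatMap (pvWrapB width)
  let border := List.replicate (width - 2).toNat '═'
  String.ofList (PySem.Chars.join ['\n']
    ([['╔'] ++ border ++ ['╗']] ++ content.map (pvFrame width) ++ [['╚'] ++ border ++ ['╝']]))

-- ===== PRECONDITION & SPEC =====
def Spec_create_bordered_text (text : String) (width : Int) (out : String) : Prop := out = create_bordered_text_alt text width
instance (text : String) (width : Int) (out : String) : Decidable (Spec_create_bordered_text text width out) := by unfold Spec_create_bordered_text; infer_instance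

-- ===== CLAIM =====
def Claim_equal_create_bordered_text : Prop := ∀ (text : String) (width : Int), Dom_create_bordered_text text width → Spec_create_bordered_text text width (create_bordered_text text width)

-- ===== LEMMAS AND PROOFS =====

-- proof-side device: A's word loop with the framing stripped (same state transitions, raw pieces)
def pvStepR (width : Int) (p : List (List Char) × List Char) (word : List Char) :
    List (List Char) × List Char :=
  if ((p.2 ++ word).length : Int) ≤ width - 4 then (p.1, p.2 ++ word ++ [' '])
  else if p.2 ≠ [] then (p.1 ++ [p.2], word ++ [' '])
  else (p.1, word ++ [' '])

def pvFlush (s : List (List Char) × List Char) : List (List Char) :=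
  if s.2 ≠ [] then s.1 ++ [s.2] else s.1

-- "each word followed by one space" form of a chunk
def pvSp (l : List (List Char)) : List Char := l.flatMap (· ++ [' '])

theorem pvStepR_le (width : Int) (p : List (List Char)) (cur w : List Char)
    (h1 : ((cur ++ w).length : Int) ≤ width - 4) :
    pvStepR width (p, cur) w = (p, cur ++ w ++ [' ']) := by
  unfold pvStepR; simp only []; rw [if_pos h1]

theorem pvStepR_flush (width : Int) (p : List (List Char)) (cur w : List Char)
    (h1 : ¬ ((cur ++ w).length : Int) ≤ width - 4) (h2 : cur ≠ []) :
    pvStepR width (p, cur) w = (p ++ [cur], w ++ [' ']) := by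
  unfold pvStepR; simp only []; rw [if_neg h1, if_pos h2]

theorem pvStepA_le (width : Int) (p : List (List Char)) (cur w : List Char)
    (h1 : ((cur ++ w).length : Int) ≤ width - 4) :
    pvStepA width (p, cur) w = (p, cur ++ w ++ [' ']) := by
  unfold pvStepA; simp only []; rw [if_pos h1]

theorem pvStepA_flush (width : Int) (p : List (List Char)) (cur w : List Char)
    (h1 : ¬ ((cur ++ w).length : Int) ≤ width - 4) (h2 : cur ≠ []) :
    pvStepA width (p, cur) w = (p ++ [pvFrame width cur], w ++ [' ']) := by
  unfold pvStepA; simp only []; rw [if_neg h1, if_pos h2]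

theorem pvStepA_nil (width : Int) (p : List (List Char)) (cur w : List Char)
    (h1 : ¬ ((cur ++ w).length : Int) ≤ width - 4) (h2 : cur = []) :
    pvStepA width (p, cur) w = (p, w ++ [' ']) := by
  subst h2; unfold pvStepA; simp only []; rw [if_neg h1, if_neg (by simp)]

-- the raw loop: already-collected pieces are only appended to
theorem pvFoldR_acc (width : Int) (words : List (List Char)) (p : List (List Char)) (cur : List Char) :
    words.foldl (pvStepR width) (p, cur)
      = (p ++ (words.foldl (pvStepR width) ([], cur)).1,
         (words.foldl (pvStepR width) ([], cur)).2) := by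
  induction words generalizing p cur with
  | nil => simp
  | cons w ws ih =>
    simp only [List.foldl]
    by_cases h1 : ((cur ++ w).length : Int) ≤ width - 4
    · rw [pvStepR_le width p cur w h1, pvStepR_le width [] cur w h1]
      exact ih p (cur ++ w ++ [' '])
    · by_cases h2 : cur = []
      · subst h2
        simp only [pvStepR, List.nil_append, ne_eq, not_true_eq_false, if_false, ite_self]
        exact ih p (w ++ [' '])
      · rw [pvStepR_flush width p cur w h1 h2, pvStepR_flush width [] cur w h1 h2]
        simp only [List.nil_append]
        rw [ih (p ++ [cur]) (w ++ [' ']), ih [cur] (w ++ [' '])]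
        simp

-- A's inner fold = the raw fold with the pieces framed, over any accumulator
theorem pvFoldAR (width : Int) (words : List (List Char)) (acc : List (List Char)) (cur : List Char) :
    words.foldl (pvStepA width) (acc, cur)
      = (acc ++ ((words.foldl (pvStepR width) ([], cur)).1).map (pvFrame width),
         (words.foldl (pvStepR width) ([], cur)).2) := by
  induction words generalizing acc cur with
  | nil => simp
  | cons w ws ih =>
    simp only [List.foldl]
    by_cases h1 : ((cur ++ w).length : Int) ≤ width - 4
    · rw [pvStepA_le width acc cur w h1, pvStepR_le width [] cur w h1]
      exact ih acc (cur ++ w ++ [' '])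
    · by_cases h2 : cur = []
      · subst h2
        rw [pvStepA_nil width acc [] w h1 rfl]
        simp only [pvStepR, List.nil_append, ne_eq, not_true_eq_false, if_false, ite_self]
        exact ih acc (w ++ [' '])
      · rw [pvStepA_flush width acc cur w h1 h2, pvStepR_flush width [] cur w h1 h2]
        simp only [List.nil_append]
        rw [ih (acc ++ [pvFrame width cur]) (w ++ [' ']), pvFoldR_acc width ws [cur] (w ++ [' '])]
        simp

-- " ".join(chunk) + " " = each word followed by one space
theorem pvJoin_sp (w : List Char) (t : List (List Char)) :
    PySem.Chars.join [' '] (w :: t) ++ [' '] = pvSp (w :: t) := by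
  induction t generalizing w with
  | nil => simp [PySem.Chars.join, pvSp, List.intercalate]
  | cons v vs ih =>
    have hj : PySem.Chars.join [' '] (w :: v :: vs)
        = w ++ [' '] ++ PySem.Chars.join [' '] (v :: vs) := by
      simp [PySem.Chars.join, List.intercalate]
    rw [hj, List.append_assoc, ih v]
    simp [pvSp]

-- the flushed raw fold computes exactly Source B's chunks
theorem pvFoldR_chunks (width used : Int) (ws : List (List Char)) (cur : List Char)
    (hc : cur ≠ []) (hu : used = (cur.length : Int)) :
    pvFlush (ws.foldl (pvStepR width) ([], cur))
      = (cur ++ pvSp (pvTake (width - 4) used ws).1)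
          :: pvChunks (width - 4) (pvTake (width - 4) used ws).2 := by
  induction ws generalizing cur used with
  | nil => simp [pvTake, pvFlush, hc, pvChunks, pvSp]
  | cons w ws ih =>
    simp only [List.foldl, pvTake]
    by_cases h1 : used + (w.length : Int) ≤ width - 4
    · have h1' : ((cur ++ w).length : Int) ≤ width - 4 := by
        simp only [List.length_append]; push_cast; omega
      rw [pvStepR_le _ _ _ _ h1', if_pos h1]
      have hrec := ih (used + (w.length : Int) + 1) (cur ++ w ++ [' ']) (by simp)
        (by simp only [List.length_append, List.length_cons, List.length_nil] at *; push_cast; omega)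
      rw [hrec]
      simp [pvSp]
    · have h1' : ¬ ((cur ++ w).length : Int) ≤ width - 4 := by
        simp only [List.length_append]; push_cast; omega
      rw [pvStepR_flush _ _ _ _ h1' hc, if_neg h1]
      have hsplit : pvFlush (ws.foldl (pvStepR width) ([] ++ [cur], w ++ [' ']))
          = [cur] ++ pvFlush (ws.foldl (pvStepR width) ([], w ++ [' '])) := by
        rw [pvFoldR_acc]
        simp only [pvFlush]
        split_ifs <;> simp
      rw [hsplit]
      have hrec := ih ((w.length : Int) + 1) (w ++ [' ']) (by simp)
        (by simp only [List.length_append, List.length_cons, List.length_nil]; push_cast; omega)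
      rw [hrec, pvChunks]
      simp [pvJoin_sp, pvSp]

-- Source B's chunks = the flushed raw fold started from the empty current_line
theorem pvChunks_eq_foldR (width : Int) (words : List (List Char)) :
    pvChunks (width - 4) words = pvFlush (words.foldl (pvStepR width) ([], [])) := by
  cases words with
  | nil => simp [pvChunks, pvFlush]
  | cons w ws =>
    have hfirst : pvStepR width ([], []) w = ([], w ++ [' ']) := by
      simp only [pvStepR, List.nil_append, ne_eq, not_true_eq_false, if_false, ite_self]
    simp only [List.foldl, hfirst]
    rw [pvFoldR_chunks width ((w.length : Int) + 1) ws (w ++ [' ']) (by simp)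
      (by simp only [List.length_append, List.length_cons, List.length_nil]; push_cast; omega)]
    rw [pvChunks]
    simp [pvJoin_sp, pvSp]

-- one line of A's outer loop appends exactly the framed pieces of B's wrap helper
theorem pvLineStepA_eq (width : Int) (acc : List (List Char)) (line : List Char) :
    pvLineStepA width acc line = acc ++ (pvWrapB width line).map (pvFrame width) := by
  unfold pvLineStepA pvWrapB
  by_cases h : ((line.length : Int)) ≤ width - 4
  · have hA : ¬ (line.length : Int) > width - 4 := by omega
    rw [if_neg hA, if_pos h]
    simp
  · have hA : (line.length : Int) > width - 4 := by omega
    rw [if_pos hA, if_neg h]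
    rw [pvFoldAR width (PySem.Chars.split₀ line) acc []]
    rw [pvChunks_eq_foldR width]
    simp only [pvFlush]
    split_ifs with h2 <;> simp

-- A's outer loop = framed flat-map of B's per-line wrap
theorem pvOuter (width : Int) (lines : List (List Char)) (acc : List (List Char)) :
    lines.foldl (pvLineStepA width) acc
      = acc ++ (lines.flatMap (pvWrapB width)).map (pvFrame width) := by
  induction lines generalizing acc with
  | nil => simp
  | cons line ls ih =>
    simp only [List.foldl, List.flatMap_cons, List.map_append]
    rw [pvLineStepA_eq, ih]
    simp

-- ===== VERDICT =====
theorem create_bordered_text_spec : Claim_equal_create_bordered_text := by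
  intro text width _
  unfold Spec_create_bordered_text
  simp only [create_bordered_text, create_bordered_text_alt]
  rw [pvOuter]
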